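-- pv_equiv track=rewrite | github.com/cobaltautomationdev/Edichangedtoexcel | streamlit_app.py | extract_isase_sections
-- ===== SOURCE A (Python) =====
-- def extract_isase_sections(lines):
--     sections = []
--     current_section = []
--     for line in lines:
--         stripped_line = line.strip()
--         if stripped_line.startswith('ISA'):
--             if current_section:
--                 sections.append('\n'.join(current_section))
--             current_section = [stripped_line]
--         else:
--             current_section.append(stripped_line)
--     if current_section:
--         sections.append('\n'.join(current_section))
--     return sections
-- ===== SOURCE B (Python) =====
-- def extract_isase_sections(lines):
--     # Strip everything once, then emit whole sections by scanning ahead to the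
--     # next 'ISA' boundary and slicing, instead of accumulating line by line.
--     stripped = [line.strip() for line in lines]
--     sections = []
--     i, n = 0, len(stripped)
--     while i < n:
--         j = i + 1
--         while j < n and not stripped[j].startswith('ISA'):
--             j += 1
--         sections.append('\n'.join(stripped[i:j]))
--         i = j
--     return sections
-- ===== Notes on version B (the rewrite author's own statement) =====
-- stated objective: alternative
-- what changed: B strips all lines up front and then emits each section in one step by scanning ahead to the next ISA boundary and slicing/joining, instead of A's line-by-line accumulator with a conditional flush.
import Mathlib
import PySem

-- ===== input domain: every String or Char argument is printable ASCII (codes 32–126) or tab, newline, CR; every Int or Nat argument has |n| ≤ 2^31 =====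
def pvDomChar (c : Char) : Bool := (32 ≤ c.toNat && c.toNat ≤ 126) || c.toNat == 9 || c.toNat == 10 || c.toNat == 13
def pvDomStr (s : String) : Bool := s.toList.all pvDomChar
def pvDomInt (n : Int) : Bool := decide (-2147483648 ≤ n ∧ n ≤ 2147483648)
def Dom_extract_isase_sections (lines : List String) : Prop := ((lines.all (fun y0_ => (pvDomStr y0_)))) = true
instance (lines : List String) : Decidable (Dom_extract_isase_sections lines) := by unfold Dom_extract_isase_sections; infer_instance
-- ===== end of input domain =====

-- B strips all lines once, then emits each section by scanning ahead to the next
-- ISA boundary and slicing, instead of A's line-by-line accumulator with a flush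
-- (objective: alternative decomposition, same asymptotic cost).


-- ===== PORT A =====
-- loop body: on an ISA line flush the current section and restart it, else append
def pvStepA (st : List String × List String) (line : String) : List String × List String :=
  let stripped := PySem.Str.strip line
  if PySem.Str.startswith stripped "ISA" then
    (if st.2 ≠ [] then st.1 ++ [PySem.Str.join "\n" st.2] else st.1, [stripped])
  else
    (st.1, st.2 ++ [stripped])

-- final 'if current_section: sections.append(...)'
def pvFlushA (st : List String × List String) : List String :=
  if st.2 ≠ [] then st.1 ++ [PySem.Str.join "\n" st.2] else st.1

def extract_isase_sections (lines : List String) : List String :=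
  pvFlushA (lines.foldl pvStepA ([], []))

-- ===== PORT B =====
-- outer while loop over the remaining (already stripped) lines; the inner j-scan
-- computes the run of non-ISA lines after the head (= takeWhile), stripped[i:j] is
-- head :: that run, and advancing i to j leaves exactly the dropWhile remainder.
def pvGoB (ss : List String) : List String :=
  match ss with
  | [] => []
  | head :: rest =>
      PySem.Str.join "\n" (head :: rest.takeWhile (fun t => !(PySem.Str.startswith t "ISA")))
        :: pvGoB (rest.dropWhile (fun t => !(PySem.Str.startswith t "ISA")))
termination_by ss.length
decreasing_by
  exact Nat.lt_succ_of_le (List.length_dropWhile_le _ _)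

def extract_isase_sections_alt (lines : List String) : List String :=
  pvGoB (lines.map PySem.Str.strip)

-- ===== PRECONDITION & SPEC =====
def Spec_extract_isase_sections (lines : List String) (out : List String) : Prop := out = extract_isase_sections_alt lines
instance (lines : List String) (out : List String) : Decidable (Spec_extract_isase_sections lines out) := by unfold Spec_extract_isase_sections; infer_instance

-- ===== CLAIM (what is proved, stated in full; the proofs are below) =====
def Claim_equal_extract_isase_sections : Prop := ∀ (lines : List String), Dom_extract_isase_sections lines → Spec_extract_isase_sections lines (extract_isase_sections lines)

-- ===== LEMMAS AND PROOFS =====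

-- proof-only characterisation of A's loop: remaining input plus pending section
def pvEmit (cur : List String) (xs : List String) : List String :=
  match xs with
  | [] => if cur = [] then [] else [PySem.Str.join "\n" cur]
  | x :: xs =>
      let s := PySem.Str.strip x
      if PySem.Str.startswith s "ISA" then
        (if cur = [] then [] else [PySem.Str.join "\n" cur]) ++ pvEmit [s] xs
      else
        pvEmit (cur ++ [s]) xs

theorem pv_foldA (xs : List String) : ∀ (secs cur : List String),
    pvFlushA (List.foldl pvStepA (secs, cur) xs) = secs ++ pvEmit cur xs := by
  induction xs with
  | nil =>
      intro secs cur
      simp only [List.foldl_nil, pvFlushA, pvEmit]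
      by_cases h : cur = [] <;> simp [h]
  | cons x xs ih =>
      intro secs cur
      by_cases hISA : PySem.Str.startswith (PySem.Str.strip x) "ISA" = true
      · by_cases h : cur = [] <;>
          · simp only [List.foldl_cons, pvStepA, pvEmit, hISA, h]
            simp [ih, h]
      · rw [Bool.not_eq_true] at hISA
        simp only [List.foldl_cons, pvStepA, pvEmit, hISA]
        simp [ih]

theorem pv_emit_cons (xs : List String) : ∀ (cur : List String), cur ≠ [] →
    pvEmit cur xs =
      PySem.Str.join "\n" (cur ++ (xs.map PySem.Str.strip).takeWhile (fun t => !(PySem.Str.startswith t "ISA")))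
        :: pvGoB ((xs.map PySem.Str.strip).dropWhile (fun t => !(PySem.Str.startswith t "ISA"))) := by
  induction xs with
  | nil =>
      intro cur hcur
      simp [pvEmit, pvGoB, hcur]
  | cons x xs ih =>
      intro cur hcur
      simp only [pvEmit, List.map_cons]
      by_cases hISA : PySem.Str.startswith (PySem.Str.strip x) "ISA" = true
      · rw [List.takeWhile_cons, List.dropWhile_cons]
        simp only [hISA, Bool.not_true, Bool.false_eq_true, if_false, reduceIte, hcur]
        rw [ih [PySem.Str.strip x] (by simp)]
        simp [pvGoB]
      · rw [List.takeWhile_cons, List.dropWhile_cons]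
        simp only [hISA, Bool.not_eq_true'] at *
        simp only [if_true]
        rw [ih (cur ++ [PySem.Str.strip x]) (by simp)]
        simp [List.append_assoc]

theorem pv_emit_nil (xs : List String) : pvEmit [] xs = pvGoB (xs.map PySem.Str.strip) := by
  cases xs with
  | nil => simp [pvEmit, pvGoB]
  | cons x xs =>
      simp only [pvEmit, List.map_cons, pvGoB]
      by_cases hISA : PySem.Str.startswith (PySem.Str.strip x) "ISA" = true
      · simp only [hISA, if_true, List.nil_append]
        rw [pv_emit_cons xs [PySem.Str.strip x] (by simp)]
        simp
      · simp only [hISA]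
        rw [pv_emit_cons xs ([] ++ [PySem.Str.strip x]) (by simp)]
        simp

-- ===== VERDICT (by name: the statement is the Claim_ definition above) =====
theorem extract_isase_sections_spec : Claim_equal_extract_isase_sections := by
  intro lines _
  show extract_isase_sections lines = extract_isase_sections_alt lines
  unfold extract_isase_sections extract_isase_sections_alt
  rw [pv_foldA, pv_emit_nil]
  simp
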